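-- pv_equiv track=rewrite | github.com/FelixLanger/MGnifyMiner | mgyminer/filter.py | end_of_column
-- ===== SOURCE A (Python) =====
-- def end_of_column(string):
--     found_letter = False
--     for count, character in enumerate(string):
--         if character == " ":
--             if found_letter:
--                 return count
--             else:
--                 continue
--         else:
--             found_letter = True
-- ===== SOURCE B (Python) =====
-- def end_of_column(string):
--     n = len(string)
--     i = 0
--     while i < n and string[i] == " ":
--         i += 1
--     if i == n:
--         return None
--     pos = string.find(" ", i)
--     return pos if pos != -1 else None
-- ===== Notes on version B (the rewrite author's own statement) =====
-- stated objective: simpler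
-- what changed: Replaced A's single flag-carrying enumerate loop with a two-phase decomposition: skip the leading run of spaces by index, then str.find with a start index locates the next space, converting the -1 sentinel to None.
import Mathlib
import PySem

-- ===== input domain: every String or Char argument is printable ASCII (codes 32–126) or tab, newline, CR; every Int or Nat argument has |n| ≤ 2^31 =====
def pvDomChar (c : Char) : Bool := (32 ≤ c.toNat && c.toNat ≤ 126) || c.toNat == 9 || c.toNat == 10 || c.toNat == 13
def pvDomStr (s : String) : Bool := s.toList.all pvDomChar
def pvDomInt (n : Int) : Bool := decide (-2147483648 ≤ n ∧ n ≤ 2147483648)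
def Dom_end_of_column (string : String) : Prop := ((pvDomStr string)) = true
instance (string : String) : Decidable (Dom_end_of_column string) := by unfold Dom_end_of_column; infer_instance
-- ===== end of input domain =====

-- B: skip-then-search decomposition instead of A's flag-carrying loop (same cost, simpler).
-- ===== PORT A =====
def endA : List Char → Bool → Int → Option Int
  | [], _, _ => none
  | c :: rest, found, count =>
    if c = ' ' then
      (if found then some count else endA rest found (count + 1))
    else endA rest true (count + 1)

def end_of_column (string : String) : Option Int :=
  endA string.toList false 0

-- ===== PORT B =====
-- the while loop skipping leading spaces
def skipSpaces : List Char → Nat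
  | [] => 0
  | c :: rest => if c = ' ' then skipSpaces rest + 1 else 0

-- string.find(" ", i): scan from index i; some index of first space, none = -1 case
def findSpace : List Char → Int → Option Int
  | [], _ => none
  | c :: rest, idx => if c = ' ' then some idx else findSpace rest (idx + 1)

def end_of_column_alt (string : String) : Option Int :=
  let l := string.toList
  let i := skipSpaces l
  if i = l.length then none else findSpace (l.drop i) (i : Int)

-- ===== PRECONDITION & SPEC =====
def Spec_end_of_column (string : String) (out : Option Int) : Prop := out = end_of_column_alt string
instance (string : String) (out : Option Int) : Decidable (Spec_end_of_column string out) := by unfold Spec_end_of_column; infer_instance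

-- ===== CLAIM (what is proved, stated in full; the proofs are below) =====
def Claim_equal_end_of_column : Prop := ∀ (string : String), Dom_end_of_column string → Spec_end_of_column string (end_of_column string)

-- ===== LEMMAS AND PROOFS =====

-- ===== VERDICT (by name: the statement is the Claim_ definition above) =====
theorem endA_true_eq_findSpace (l : List Char) (k : Int) :
    endA l true k = findSpace l k := by
  induction l generalizing k with
  | nil => rfl
  | cons c rest ih =>
    simp only [endA, findSpace]
    split_ifs with h <;> simp [ih]

theorem endA_false_eq (l : List Char) (k : Int) :
    endA l false k =
      (if skipSpaces l = l.length then none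
       else findSpace (l.drop (skipSpaces l)) (k + (skipSpaces l : Int))) := by
  induction l generalizing k with
  | nil => rfl
  | cons c rest ih =>
    by_cases h : c = ' '
    · subst h
      simp only [endA, skipSpaces, Bool.false_eq_true, if_false, if_true,
        List.length_cons, List.drop_succ_cons]
      rw [ih (k + 1)]
      by_cases h2 : skipSpaces rest = rest.length
      · simp [h2]
      · have h3 : skipSpaces rest + 1 ≠ rest.length + 1 := by omega
        rw [if_neg h2, if_neg h3]
        congr 1
        push_cast
        ring
    · simp only [endA, skipSpaces, if_neg h, List.length_cons]
      have hne : (0 : Nat) ≠ rest.length + 1 := by omega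
      rw [endA_true_eq_findSpace, if_neg hne]
      simp [findSpace, h]

theorem end_of_column_spec : Claim_equal_end_of_column := by
  intro s _
  unfold Spec_end_of_column end_of_column end_of_column_alt
  rw [endA_false_eq]
  simp
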